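-- pv_equiv track=rewrite | github.com/advantagewtf/cmemutils | DrexLib/Utils.py | greenblue
-- ===== SOURCE A (Python) =====
-- def greenblue(text: str) -> str:
--     faded = ""
--     blue = 100
--     for line in text.splitlines():
--         faded += (f"\033[38;2;0;255;{blue}m{line}\033[0m\n")
--         if blue != 255:
--             blue += 15
--             if blue > 255:
--                 blue = 255
--     return faded
-- ===== SOURCE B (Python) =====
-- _PALETTE = tuple(range(100, 251, 15))  # the 11 ramp values 100..250; later lines saturate at 255
--
-- def greenblue(text: str) -> str:
--     lines = text.splitlines()
--     head = [f"\033[38;2;0;255;{b}m{line}\033[0m\n" for b, line in zip(_PALETTE, lines)]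
--     tail = [f"\033[38;2;0;255;255m{line}\033[0m\n" for line in lines[len(_PALETTE):]]
--     return "".join(head + tail)
-- ===== Notes on version B (the rewrite author's own statement) =====
-- stated objective: alternative
-- what changed: Replaced A's single stateful loop (running blue accumulator with saturation branches, += concatenation) by a staged palette-table construction: zip the lines with a precomputed 11-entry ramp table for the fading head, format the remaining lines[11:] at the constant 255, and join the two lists.
import Mathlib
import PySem

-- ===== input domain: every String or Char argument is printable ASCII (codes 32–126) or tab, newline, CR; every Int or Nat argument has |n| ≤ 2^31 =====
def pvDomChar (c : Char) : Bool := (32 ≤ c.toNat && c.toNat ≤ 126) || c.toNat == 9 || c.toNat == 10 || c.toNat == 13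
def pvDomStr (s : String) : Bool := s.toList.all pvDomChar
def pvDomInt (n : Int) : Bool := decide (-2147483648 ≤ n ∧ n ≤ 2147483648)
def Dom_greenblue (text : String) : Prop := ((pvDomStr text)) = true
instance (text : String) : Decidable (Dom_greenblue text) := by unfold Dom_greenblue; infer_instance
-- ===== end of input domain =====

-- B replaces A's stateful accumulator loop by a staged construction: zip the lines
-- with a precomputed 11-entry ramp table, format the rest at constant 255, join both
-- (objective: alternative decomposition, same cost).

-- ===== PORT A =====
-- one loop step of A: append the colored line, then advance the blue accumulator
def gbStepA (st : String × Int) (line : String) : String × Int :=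
  let faded := st.1 ++ "\x1b[38;2;0;255;" ++ PySem.Int.toStr st.2 ++ "m" ++ line ++ "\x1b[0m\n"
  let blue := if st.2 ≠ 255 then (if st.2 + 15 > 255 then (255 : Int) else st.2 + 15) else st.2
  (faded, blue)

def greenblue (text : String) : String :=
  ((PySem.Str.splitlines text).foldl gbStepA ("", 100)).1

-- ===== PORT B =====
-- _PALETTE = tuple(range(100, 251, 15)) : the 11 ramp values
def gbPalette : List Int := PySem.List.pyRange 100 251 15

-- one formatted line at blue value b
def gbFmt (b : Int) (line : String) : String :=
  "\x1b[38;2;0;255;" ++ PySem.Int.toStr b ++ "m" ++ line ++ "\x1b[0m\n"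

def greenblue_alt (text : String) : String :=
  let lines := PySem.Str.splitlines text
  let head := (gbPalette.zip lines).map (fun p => gbFmt p.1 p.2)
  let tail := (PySem.List.slice lines (some (gbPalette.length : Int)) none).map (gbFmt 255)
  PySem.Str.join "" (head ++ tail)

-- ===== PRECONDITION & SPEC =====
def Spec_greenblue (text : String) (out : String) : Prop := out = greenblue_alt text
instance (text : String) (out : String) : Decidable (Spec_greenblue text out) := by unfold Spec_greenblue; infer_instance

-- ===== CLAIM (what is proved, stated in full; the proofs are below) =====
def Claim_equal_greenblue : Prop := ∀ (text : String), Dom_greenblue text → Spec_greenblue text (greenblue text)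

-- ===== LEMMAS AND PROOFS =====

theorem join_empty_nil : PySem.Str.join "" ([] : List String) = "" := by
  rw [← String.toList_inj]
  simp [PySem.Str.toList_join, PySem.Chars.join, List.intercalate]

theorem join_empty_cons (x : String) (xs : List String) :
    PySem.Str.join "" (x :: xs) = x ++ PySem.Str.join "" xs := by
  rw [← String.toList_inj]
  cases xs <;> simp [PySem.Str.toList_join, PySem.Chars.join, List.intercalate]

-- the palette literal, once
theorem gbPalette_eq :
    gbPalette = [100, 115, 130, 145, 160, 175, 190, 205, 220, 235, 250] := by
  decide

-- A's blue update sends the head of the k-th palette suffix to the head of the (k+1)-st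
theorem gb_blue_step (k : Nat) :
    (let b := (gbPalette.drop k).headD 255
     if b ≠ 255 then (if b + 15 > 255 then (255 : Int) else b + 15) else b)
      = (gbPalette.drop (k + 1)).headD 255 := by
  rw [gbPalette_eq] at *
  by_cases h : k < 11
  · interval_cases k <;> decide
  · rw [List.drop_eq_nil_of_le (by simpa using Nat.le_of_not_lt h),
        List.drop_eq_nil_of_le (by simp; omega)]
    decide

-- loop invariant: from the k-th palette suffix, A's fold appends B's staged pieces
theorem gb_loop (lines : List String) : ∀ (k : Nat) (acc : String),
    (lines.foldl gbStepA (acc, (gbPalette.drop k).headD 255)).1 =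
      acc ++ PySem.Str.join ""
        (((gbPalette.drop k).zip lines).map (fun p => gbFmt p.1 p.2)
          ++ (lines.drop (gbPalette.drop k).length).map (gbFmt 255)) := by
  induction lines with
  | nil =>
    intro k acc
    simp [join_empty_nil]
  | cons l t ih =>
    intro k acc
    cases hp : gbPalette.drop k with
    | nil =>
      have hk : 11 ≤ k := by
        by_contra h
        rw [gbPalette_eq] at hp
        interval_cases k <;> simp_all
      have hstep : gbStepA (acc, (255 : Int)) l = (acc ++ gbFmt 255 l, 255) := by
        simp [gbStepA, gbFmt, String.append_assoc]
      have hp' : gbPalette.drop (k + 1) = [] := by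
        rw [gbPalette_eq]; exact List.drop_eq_nil_of_le (by simp; omega)
      have := ih (k + 1) (acc ++ gbFmt 255 l)
      rw [hp'] at this
      simp only [List.headD_nil, List.foldl_cons, hstep, List.zip_nil_left,
        List.map_nil, List.nil_append, List.length_nil, List.drop_zero,
        List.map_cons, join_empty_cons] at this ⊢
      rw [this, String.append_assoc]
    | cons b pt =>
      have hb : (gbPalette.drop k).headD 255 = b := by rw [hp]; rfl
      have hstep : gbStepA (acc, b) l = (acc ++ gbFmt b l, (gbPalette.drop (k + 1)).headD 255) := by
        have := gb_blue_step k
        rw [hb] at this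
        simp only [gbStepA, gbFmt, this, String.append_assoc]
      have hpt : gbPalette.drop (k + 1) = pt := by
        rw [← List.drop_drop, hp]; rfl
      have := ih (k + 1) (acc ++ gbFmt b l)
      rw [hpt] at this hstep
      simp only [List.headD_cons, List.foldl_cons, hstep, this,
        List.zip_cons_cons, List.map_cons,
        List.length_cons, List.drop_succ_cons, String.append_assoc]
      rw [List.cons_append, join_empty_cons]

-- ===== VERDICT (by name: the statement is the Claim_ definition above) =====
theorem greenblue_spec : Claim_equal_greenblue := by
  intro text _
  unfold Spec_greenblue greenblue greenblue_alt
  have h := gb_loop (PySem.Str.splitlines text) 0 ""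
  have hlen : (gbPalette.length : Int) = ((11 : Nat) : Int) := by rw [gbPalette_eq]; rfl
  rw [List.drop_zero] at h
  simp only [hlen, PySem.List.slice_from_natCast]
  have h100 : gbPalette.headD 255 = (100 : Int) := by rw [gbPalette_eq]; rfl
  rw [h100] at h
  have hl : gbPalette.length = 11 := by rw [gbPalette_eq]; rfl
  rw [hl] at h
  simpa using h
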